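-- pv_equiv track=rewrite | github.com/SidyKing/Ronnie-Codeman | Winnie/backend/detector.py | detect_attack
-- ===== SOURCE A (Python) =====
-- def detect_attack(timestamps, limit, timeframe):
--     """Generalized attack detection logic."""
--     if len(timestamps) < limit:
--         return False
--
--     timestamps.sort()
--     for i in range(len(timestamps) - limit + 1):
--         if timestamps[i + limit - 1] - timestamps[i] <= timeframe:
--             return True
--
--     return False
-- ===== SOURCE B (Python) =====
-- def detect_attack(timestamps, limit, timeframe):
--     """Generalized attack detection logic (two-pointer sliding window)."""
--     if len(timestamps) < limit:
--         return False
--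
--     timestamps.sort()
--     left = 0
--     for right in range(len(timestamps)):
--         while left <= right and timestamps[right] - timestamps[left] > timeframe:
--             left += 1
--         if right - left + 1 >= limit:
--             return True
--     return False
-- ===== Notes on version B (the rewrite author's own statement) =====
-- stated objective: alternative
-- what changed: Replaced the fixed-stride window scan (checking timestamps[i+limit-1]-timestamps[i] for every start i) by a two-pointer sliding window that maintains a variable-width interval with one left pointer advanced monotonically; both still sort in place first.
-- outside the precondition, e.g. on detect_attack([0, 10], 0, 5): A returns True, B returns True; on detect_attack([], 0, 0): A raises IndexError, B returns False
import Mathlib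
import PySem

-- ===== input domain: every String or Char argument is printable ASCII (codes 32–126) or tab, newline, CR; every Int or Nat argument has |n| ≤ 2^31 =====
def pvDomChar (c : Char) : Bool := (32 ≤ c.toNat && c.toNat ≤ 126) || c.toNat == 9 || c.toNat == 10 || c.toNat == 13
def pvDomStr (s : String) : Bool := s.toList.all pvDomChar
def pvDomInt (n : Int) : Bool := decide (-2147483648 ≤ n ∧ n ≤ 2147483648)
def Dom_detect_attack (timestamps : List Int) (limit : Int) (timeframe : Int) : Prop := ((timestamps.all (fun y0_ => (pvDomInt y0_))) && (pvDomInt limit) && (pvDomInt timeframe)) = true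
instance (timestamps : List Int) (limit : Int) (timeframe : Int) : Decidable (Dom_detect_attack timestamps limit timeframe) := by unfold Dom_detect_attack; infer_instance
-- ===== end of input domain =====

-- B replaces A's fixed-stride window scan by a two-pointer sliding window (alternative
-- decomposition, same cost). Both sort the argument in place; the equivalence proved here is
-- about the return value (B performs the same in-place sort mutation as A on admitted inputs).

-- ===== PORT A =====
-- 'for i in range(len(timestamps) - limit + 1): if timestamps[i+limit-1] - timestamps[i] <= timeframe: return True'
-- recursion over the index list; a 'none' from pyGet? is Python's IndexError (excluded by
-- Pre_detect_attack: with 1 ≤ limit every index reached here is in range), the loop stops there.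
def detect_attack_loop (s : List Int) (limit timeframe : Int) : List Int → Bool
  | [] => false
  | i :: rest =>
    match PySem.List.pyGet? s (i + limit - 1), PySem.List.pyGet? s i with
    | some a, some b => if a - b ≤ timeframe then true else detect_attack_loop s limit timeframe rest
    | _, _ => false

def detect_attack (timestamps : List Int) (limit : Int) (timeframe : Int) : Bool :=
  if (timestamps.length : Int) < limit then false
  else
    detect_attack_loop (PySem.List.sorted timestamps (fun x => x) false) limit timeframe
      (PySem.List.pyRange 0 ((timestamps.length : Int) - limit + 1) 1)

-- ===== PORT B =====
-- 'while left <= right and timestamps[right] - timestamps[left] > timeframe: left += 1'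
-- fuel = right + 1 - left counts exactly the iterations the guard 'left <= right' still allows,
-- and left ≤ right < s.length keeps every access in range, so getD is exact here.
def alt_moveLeft (s : List Int) (timeframe rv : Int) : Nat → Nat → Nat
  | left, 0 => left
  | left, fuel+1 =>
    if timeframe < rv - s.getD left 0 then alt_moveLeft s timeframe rv (left+1) fuel else left

-- 'for right in range(len(timestamps)):' with the running left pointer as accumulator
def alt_loop (s : List Int) (limit timeframe : Int) : Nat → List Nat → Bool
  | _, [] => false
  | left, right :: rest =>
    let l := alt_moveLeft s timeframe (s.getD right 0) left (right + 1 - left)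
    if limit ≤ (right : Int) - (l : Int) + 1 then true
    else alt_loop s limit timeframe l rest

def detect_attack_alt (timestamps : List Int) (limit : Int) (timeframe : Int) : Bool :=
  if (timestamps.length : Int) < limit then false
  else
    alt_loop (PySem.List.sorted timestamps (fun x => x) false) limit timeframe 0
      (List.range timestamps.length)

-- ===== PRECONDITION & SPEC =====
-- Pre_ restricts to a meaningful event count: limit ≤ 0 is outside the function's natural domain —
-- there A relies on negative-index wraparound and raises IndexError on some inputs (e.g. ([], 0, 0)).
def Pre_detect_attack (timestamps : List Int) (limit : Int) (timeframe : Int) : Prop := 1 ≤ limit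
instance (timestamps : List Int) (limit : Int) (timeframe : Int) : Decidable (Pre_detect_attack timestamps limit timeframe) := by unfold Pre_detect_attack; infer_instance
def pvWitness_detect_attack : List Int × Int × Int := ([3, 1, 2], 2, 5)

def Spec_detect_attack (timestamps : List Int) (limit : Int) (timeframe : Int) (out : Bool) : Prop := out = detect_attack_alt timestamps limit timeframe
instance (timestamps : List Int) (limit : Int) (timeframe : Int) (out : Bool) : Decidable (Spec_detect_attack timestamps limit timeframe out) := by unfold Spec_detect_attack; infer_instance

-- ===== CLAIM (what is proved, stated in full; the proofs are below) =====
def Claim_equal_detect_attack : Prop := ∀ (timestamps : List Int) (limit : Int) (timeframe : Int), Dom_detect_attack timestamps limit timeframe → Pre_detect_attack timestamps limit timeframe → Spec_detect_attack timestamps limit timeframe (detect_attack timestamps limit timeframe)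

-- ===== LEMMAS AND PROOFS =====

lemma moveLeft_ge (s : List Int) (tf rv : Int) :
    ∀ fuel left, left ≤ alt_moveLeft s tf rv left fuel := by
  intro fuel
  induction fuel with
  | zero => intro left; simp [alt_moveLeft]
  | succ f ih =>
    intro left
    simp only [alt_moveLeft]
    split
    · exact le_trans (Nat.le_succ _) (ih _)
    · exact le_refl _

lemma moveLeft_le (s : List Int) (tf rv : Int) :
    ∀ fuel left, alt_moveLeft s tf rv left fuel ≤ left + fuel := by
  intro fuel
  induction fuel with
  | zero => intro left; simp [alt_moveLeft]
  | succ f ih =>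
    intro left
    simp only [alt_moveLeft]
    split
    · exact le_trans (ih _) (by omega)
    · omega

-- every index the left pointer passed violates the window condition
lemma moveLeft_passed (s : List Int) (tf rv : Int) :
    ∀ fuel left i, left ≤ i → i < alt_moveLeft s tf rv left fuel →
      tf < rv - s.getD i 0 := by
  intro fuel
  induction fuel with
  | zero => intro left i h1 h2; simp only [alt_moveLeft] at h2; omega
  | succ f ih =>
    intro left i h1 h2
    simp only [alt_moveLeft] at h2
    by_cases hcond : tf < rv - s.getD left 0
    · rw [if_pos hcond] at h2
      rcases Nat.eq_or_lt_of_le h1 with rfl | hlt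
      · exact hcond
      · exact ih (left + 1) i hlt h2
    · rw [if_neg hcond] at h2; omega

-- if the pointer stopped before exhausting the guard, it stopped on a satisfied condition
lemma moveLeft_stop (s : List Int) (tf rv : Int) :
    ∀ fuel left, alt_moveLeft s tf rv left fuel < left + fuel →
      rv - s.getD (alt_moveLeft s tf rv left fuel) 0 ≤ tf := by
  intro fuel
  induction fuel with
  | zero => intro left h; simp only [alt_moveLeft] at h; omega
  | succ f ih =>
    intro left h
    simp only [alt_moveLeft] at h ⊢
    by_cases hcond : tf < rv - s.getD left 0
    · rw [if_pos hcond] at h ⊢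
      exact ih (left + 1) (by omega)
    · rw [if_neg hcond] at h ⊢; omega

-- two-pointer loop characterisation: starting at right pointer r with left pointer 'left'
-- whose passed indices all violate every remaining window, the loop finds exactly the
-- sorted windows of width limit that end at index ≥ r
lemma alt_loop_iff (s : List Int) (limit tf : Int) (hl : 1 ≤ limit)
    (hs : ∀ i j : Nat, i ≤ j → j < s.length → s.getD i 0 ≤ s.getD j 0) :
    ∀ (m r left : Nat), r + m = s.length → left ≤ r →
      (∀ i, i < left → ∀ rr, r ≤ rr → rr < s.length → tf < s.getD rr 0 - s.getD i 0) →
      (alt_loop s limit tf left (List.range' r m) = true ↔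
        ∃ i : Nat, i + limit.toNat ≤ s.length ∧ r ≤ i + limit.toNat - 1 ∧
          s.getD (i + limit.toNat - 1) 0 - s.getD i 0 ≤ tf) := by
  intro m
  induction m with
  | zero =>
    intro r left hn _ _
    simp only [List.range', alt_loop]
    constructor
    · intro h; cases h
    · rintro ⟨i, h1, h2, _⟩; omega
  | succ m ih =>
    intro r left hn hlr hinv
    have hrn : r < s.length := by omega
    rw [List.range'_succ]
    simp only [alt_loop]
    have h1 : left ≤ alt_moveLeft s tf (s.getD r 0) left (r + 1 - left) :=
      moveLeft_ge s tf _ _ _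
    have h2 : alt_moveLeft s tf (s.getD r 0) left (r + 1 - left) ≤ r + 1 := by
      have := moveLeft_le s tf (s.getD r 0) (r + 1 - left) left; omega
    set l' := alt_moveLeft s tf (s.getD r 0) left (r + 1 - left) with hl'def
    by_cases hc : limit ≤ (r : Int) - (l' : Int) + 1
    · rw [if_pos hc]
      have hl'r : l' ≤ r := by omega
      have hstop : s.getD r 0 - s.getD l' 0 ≤ tf := by
        have := moveLeft_stop s tf (s.getD r 0) (r + 1 - left) left
        rw [← hl'def] at this
        exact this (by omega)
      have hk1 : 1 ≤ limit.toNat := by omega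
      have hkr : limit.toNat ≤ r + 1 := by omega
      constructor
      · intro _
        refine ⟨r + 1 - limit.toNat, by omega, by omega, ?_⟩
        have hidx : r + 1 - limit.toNat + limit.toNat - 1 = r := by omega
        rw [hidx]
        have hli : l' ≤ r + 1 - limit.toNat := by omega
        have := hs l' (r + 1 - limit.toNat) hli (by omega)
        omega
      · intro _; rfl
    · rw [if_neg hc]
      have hinv' : ∀ i, i < l' → ∀ rr, r + 1 ≤ rr → rr < s.length →
          tf < s.getD rr 0 - s.getD i 0 := by
        intro i hi rr hrr hrrn
        by_cases hil : i < left
        · exact hinv i hil rr (by omega) hrrn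
        · have hpass := moveLeft_passed s tf (s.getD r 0) (r + 1 - left) left i (by omega)
          rw [← hl'def] at hpass
          have := hpass hi
          have hmon := hs r rr (by omega) hrrn
          omega
      rw [ih (r + 1) l' (by omega) (by omega) hinv']
      constructor
      · rintro ⟨i, ha, hb, hcv⟩; exact ⟨i, ha, by omega, hcv⟩
      · rintro ⟨i, ha, hb, hcv⟩
        by_cases hb' : r + 1 ≤ i + limit.toNat - 1
        · exact ⟨i, ha, hb', hcv⟩
        · exfalso
          have hk1 : 1 ≤ limit.toNat := by omega
          have hie : i + limit.toNat - 1 = r := by omega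
          have hil' : i < l' := by omega
          have hcontra : tf < s.getD r 0 - s.getD i 0 := by
            by_cases hil : i < left
            · exact hinv i hil r (le_refl r) hrn
            · have hpass := moveLeft_passed s tf (s.getD r 0) (r + 1 - left) left i (by omega)
              rw [← hl'def] at hpass
              exact hpass hil'
          rw [hie] at hcv
          omega

-- A's scan characterisation: the loop over an in-range index list is the window existential
lemma aloop_iff (s : List Int) (limit tf : Int) :
    ∀ is_ : List Int, (∀ i ∈ is_, 0 ≤ i ∧ i < (s.length : Int) ∧ i + limit - 1 < (s.length : Int) ∧ 0 ≤ i + limit - 1) →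
      (detect_attack_loop s limit tf is_ = true ↔
        ∃ i ∈ is_, s.getD (i + limit - 1).toNat 0 - s.getD i.toNat 0 ≤ tf) := by
  intro is_
  induction is_ with
  | nil => intro _; simp [detect_attack_loop]
  | cons i rest ih =>
    intro hbound
    obtain ⟨hi0, hisl, hiu, hil⟩ := hbound i (List.mem_cons_self ..)
    have e1 : PySem.List.pyGet? s (i + limit - 1) = some (s.getD (i + limit - 1).toNat 0) := by
      rw [PySem.List.pyGet?_eq_some_getElem s hil hiu,
        List.getD_eq_getElem s 0 (by omega)]
    have e2 : PySem.List.pyGet? s i = some (s.getD i.toNat 0) := by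
      rw [PySem.List.pyGet?_eq_some_getElem s hi0 hisl,
        List.getD_eq_getElem s 0 (by omega)]
    simp only [detect_attack_loop, e1, e2]
    by_cases hcond : s.getD (i + limit - 1).toNat 0 - s.getD i.toNat 0 ≤ tf
    · rw [if_pos hcond]
      simp only [true_iff]
      exact ⟨i, List.mem_cons_self .., hcond⟩
    · rw [if_neg hcond]
      rw [ih (fun j hj => hbound j (List.mem_cons_of_mem i hj))]
      constructor
      · rintro ⟨j, hj, hjv⟩; exact ⟨j, List.mem_cons_of_mem i hj, hjv⟩
      · rintro ⟨j, hj, hjv⟩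
        rcases List.mem_cons.1 hj with rfl | hj'
        · exact absurd hjv hcond
        · exact ⟨j, hj', hjv⟩

-- ===== VERDICT (by name: the statement is the Claim_ definition above) =====
theorem detect_attack_spec : Claim_equal_detect_attack := by
  unfold Claim_equal_detect_attack
  intro ts limit tf _ hpre
  unfold Pre_detect_attack at hpre
  unfold Spec_detect_attack detect_attack detect_attack_alt
  by_cases hg : (ts.length : Int) < limit
  · rw [if_pos hg, if_pos hg]
  · rw [if_neg hg, if_neg hg]
    push Not at hg
    set s := PySem.List.sorted ts (fun x => x) false with hsdef
    have hlen : s.length = ts.length := PySem.List.length_sorted ts (fun x => x) false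
    have hs : ∀ i j : Nat, i ≤ j → j < s.length → s.getD i 0 ≤ s.getD j 0 := by
      intro i j hij hj
      rw [List.getD_eq_getElem s 0 (by omega), List.getD_eq_getElem s 0 hj]
      exact PySem.List.sorted_id_getElem_mono ts hij (by rw [← hsdef] at *; omega)
    rw [Bool.eq_iff_iff]
    rw [aloop_iff s limit tf _ (by
      intro i hi
      rw [PySem.List.mem_pyRange_one] at hi
      refine ⟨hi.1, by omega, by omega, by omega⟩)]
    rw [List.range_eq_range']
    rw [alt_loop_iff s limit tf hpre hs ts.length 0 0 (by omega) (le_refl 0)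
      (by intro i hi; omega)]
    constructor
    · rintro ⟨i, him, hv⟩
      rw [PySem.List.mem_pyRange_one] at him
      refine ⟨i.toNat, by omega, by omega, ?_⟩
      have hidx : i.toNat + limit.toNat - 1 = (i + limit - 1).toNat := by omega
      rw [hidx]
      exact hv
    · rintro ⟨j, hj1, hj2, hjv⟩
      refine ⟨(j : Int), PySem.List.mem_pyRange_one.2 ⟨by omega, by omega⟩, ?_⟩
      have hidx : ((j : Int) + limit - 1).toNat = j + limit.toNat - 1 := by omega
      rw [hidx, Int.toNat_natCast]
      exact hjv
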